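-- pv_equiv track=rewrite | github.com/MrBrantCode/unitest_baseline | mut_generate/mist_train_cf/cf_85900/solution.py | palindrome_vowels_checker
-- ===== SOURCE A (Python) =====
-- def palindrome_vowels_checker(s):
--     # Convert to lowercase for easier processing
--     s = s.lower()
--
--     # Check if the input is a palindrome
--     if s != s[::-1]:
--         return False
--
--     # Check if all vowels are present
--     vowels = ['a', 'e', 'i', 'o', 'u']
--     for vowel in vowels:
--         if vowel not in s:
--             return False
--
--     return True
-- ===== SOURCE B (Python) =====
-- def palindrome_vowels_checker(s):
--     t = s.lower()
--     n = len(t)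
--     # two-pointer palindrome check: compare mirrored positions once each
--     for i in range(n // 2):
--         if t[i] != t[n - 1 - i]:
--             return False
--     # build the set of present characters once, then one subset comparison
--     return set('aeiou') <= set(t)
-- ===== Notes on version B (the rewrite author's own statement) =====
-- stated objective: alternative
-- what changed: Replaces the full-reversal comparison with a two-pointer mirrored-index scan over half the string, and replaces the five repeated per-vowel membership scans with one pass building the set of present characters followed by a single subset test.
import Mathlib
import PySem

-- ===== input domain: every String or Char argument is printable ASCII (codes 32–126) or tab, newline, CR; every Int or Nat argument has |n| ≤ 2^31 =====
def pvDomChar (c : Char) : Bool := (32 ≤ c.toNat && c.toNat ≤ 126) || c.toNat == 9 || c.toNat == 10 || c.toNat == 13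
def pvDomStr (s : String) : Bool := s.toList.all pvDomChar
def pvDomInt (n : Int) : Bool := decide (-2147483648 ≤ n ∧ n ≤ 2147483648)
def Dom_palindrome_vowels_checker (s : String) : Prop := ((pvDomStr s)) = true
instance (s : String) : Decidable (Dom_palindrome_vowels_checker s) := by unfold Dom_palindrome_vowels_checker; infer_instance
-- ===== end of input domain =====

-- B replaces the full-reversal comparison with a two-pointer mirrored-index scan over half the
-- string and the five repeated vowel scans with one set built from the string plus a subset test.

-- ===== PORT A =====
-- for vowel in vowels: if vowel not in s: return False / return True
def pvAVowelLoop (t : List Char) : List Char → Bool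
  | [] => true
  | v :: vs => if ¬ (v ∈ t) then false else pvAVowelLoop t vs

def palindrome_vowels_checker (s : String) : Bool :=
  let t := PySem.Str.lower s
  if t.toList ≠ t.toList.reverse then false  -- s != s[::-1]
  else pvAVowelLoop t.toList ['a', 'e', 'i', 'o', 'u']

-- ===== PORT B =====
def palindrome_vowels_checker_alt (s : String) : Bool :=
  let t := (PySem.Str.lower s).toList
  let n := t.length
  -- for i in range(n // 2): if t[i] != t[n-1-i]: return False
  if (List.range (n / 2)).any (fun i => t.getD i ' ' != t.getD (n - 1 - i) ' ') then false
  else PySem.Set.issubset (PySem.Set.ofList ['a', 'e', 'i', 'o', 'u']) (PySem.Set.ofList t)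

-- ===== PRECONDITION & SPEC =====
def Spec_palindrome_vowels_checker (s : String) (out : Bool) : Prop := out = palindrome_vowels_checker_alt s
instance (s : String) (out : Bool) : Decidable (Spec_palindrome_vowels_checker s out) := by unfold Spec_palindrome_vowels_checker; infer_instance

-- ===== CLAIM (what is proved, stated in full; the proofs are below) =====
def Claim_equal_palindrome_vowels_checker : Prop := ∀ (s : String), Dom_palindrome_vowels_checker s → Spec_palindrome_vowels_checker s (palindrome_vowels_checker s)

-- ===== LEMMAS AND PROOFS =====

-- the two-pointer half scan finds no mismatch iff the list equals its reverse
lemma half_scan_eq_reverse (t : List Char) :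
    ((List.range (t.length / 2)).any (fun i => t.getD i ' ' != t.getD (t.length - 1 - i) ' ') = false)
    ↔ t = t.reverse := by
  simp only [List.any_eq_false, List.mem_range, bne_iff_ne, ne_eq, not_not]
  constructor
  · intro h
    apply List.ext_getElem (by simp)
    intro i hi hi'
    rw [List.getElem_reverse]
    by_cases hc : i < t.length / 2
    · have := h i hc
      rwa [List.getD_eq_getElem _ _ hi, List.getD_eq_getElem _ _ (by omega)] at this
    · rcases Nat.lt_or_ge i (t.length - 1 - i) with hlt | hge
      · omega
      · rcases Nat.eq_or_lt_of_le hge with heq | hlt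
        · simp [heq]
        · have hj : t.length - 1 - i < t.length / 2 := by omega
          have := h (t.length - 1 - i) hj
          rw [List.getD_eq_getElem _ _ (by omega), List.getD_eq_getElem _ _ (by omega)] at this
          have hidx : t.length - 1 - (t.length - 1 - i) = i := by omega
          simp only [hidx] at this
          exact this.symm
  · intro h i hi
    rw [List.getD_eq_getElem _ _ (by omega), List.getD_eq_getElem _ _ (by omega)]
    have h1 : t[i]'(by omega) = t.reverse[i]'(by simpa using by omega) := List.getElem_of_eq h (by omega)
    rw [h1, List.getElem_reverse]

-- A's early-return vowel loop equals B's subset test over the same string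
lemma vowel_loop_eq_subset (t : List Char) :
    pvAVowelLoop t ['a', 'e', 'i', 'o', 'u']
      = PySem.Set.issubset (PySem.Set.ofList ['a', 'e', 'i', 'o', 'u']) (PySem.Set.ofList t) := by
  have hsub : PySem.Set.issubset (PySem.Set.ofList ['a', 'e', 'i', 'o', 'u']) (PySem.Set.ofList t)
      = (['a', 'e', 'i', 'o', 'u'].all fun v => decide (v ∈ t)) := by
    by_cases h : ∀ v ∈ (['a', 'e', 'i', 'o', 'u'] : List Char), v ∈ t
    · rw [List.all_eq_true.2 (by simpa using h)]
      rw [PySem.Set.issubset_iff]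
      intro x hx
      simp only [PySem.Set.mem_ofList] at hx ⊢
      exact h x hx
    · have h' : ¬ (PySem.Set.issubset (PySem.Set.ofList ['a', 'e', 'i', 'o', 'u']) (PySem.Set.ofList t) = true) := by
        rw [PySem.Set.issubset_iff]
        intro hc
        exact h fun v hv => by simpa using hc v (by simpa using hv)
      rw [Bool.eq_false_iff.2 h', eq_comm, Bool.eq_false_iff]
      intro hc
      exact h fun v hv => by simpa using List.all_eq_true.1 hc v hv
  rw [hsub]
  simp only [pvAVowelLoop, List.all_cons, List.all_nil]
  split_ifs <;> simp_all

-- the two bodies agree on any character list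
lemma bodies_eq (t : List Char) :
    (if t ≠ t.reverse then false else pvAVowelLoop t ['a', 'e', 'i', 'o', 'u'])
    = (if (List.range (t.length / 2)).any (fun i => t.getD i ' ' != t.getD (t.length - 1 - i) ' ') then false
       else PySem.Set.issubset (PySem.Set.ofList ['a', 'e', 'i', 'o', 'u']) (PySem.Set.ofList t)) := by
  by_cases hpal : t = t.reverse
  · have h2 := (half_scan_eq_reverse t).2 hpal
    rw [if_neg (not_not_intro hpal), h2]
    simp [vowel_loop_eq_subset t]
  · have h2 : ¬ ((List.range (t.length / 2)).any (fun i => t.getD i ' ' != t.getD (t.length - 1 - i) ' ') = false) :=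
      fun hf => hpal ((half_scan_eq_reverse t).1 hf)
    rw [if_pos (by simpa using hpal), if_pos]
    exact Bool.ne_false_iff.mp h2

-- ===== VERDICT (by name: the statement is the Claim_ definition above) =====
theorem palindrome_vowels_checker_spec : Claim_equal_palindrome_vowels_checker := by
  intro s _
  unfold Spec_palindrome_vowels_checker palindrome_vowels_checker palindrome_vowels_checker_alt
  exact bodies_eq (PySem.Str.lower s).toList
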